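-- pv_equiv track=rewrite | github.com/NekhoroshevMikhail/test | main.py | sort_values
-- ===== SOURCE A (Python) =====
-- def sort_values(values, order_rule):
--     buckets = {}
--     for v in values:
--         rank = int(order_rule[v])
--
--         if rank not in buckets:
--             buckets[rank] = []
--
--         buckets[rank].append(v)
--
--     result = []
--     for i in sorted(buckets):
--         result.extend(buckets[i])
--
--     return result
-- ===== SOURCE B (Python) =====
-- def sort_values(values, order_rule):
--     # One stable key-sort: stability keeps the within-rank original order,
--     # exactly reproducing A's bucket grouping + ascending-rank concatenation.
--     return sorted(values, key=lambda v: int(order_rule[v]))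
-- ===== Notes on version B (the rewrite author's own statement) =====
-- stated objective: idiomatic
-- what changed: Replaces the rank-bucket dict plus sorted-keys concatenation with a single stable key-sort sorted(values, key=lambda v: int(order_rule[v])); Timsort stability reproduces the within-bucket original order.
import Mathlib
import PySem

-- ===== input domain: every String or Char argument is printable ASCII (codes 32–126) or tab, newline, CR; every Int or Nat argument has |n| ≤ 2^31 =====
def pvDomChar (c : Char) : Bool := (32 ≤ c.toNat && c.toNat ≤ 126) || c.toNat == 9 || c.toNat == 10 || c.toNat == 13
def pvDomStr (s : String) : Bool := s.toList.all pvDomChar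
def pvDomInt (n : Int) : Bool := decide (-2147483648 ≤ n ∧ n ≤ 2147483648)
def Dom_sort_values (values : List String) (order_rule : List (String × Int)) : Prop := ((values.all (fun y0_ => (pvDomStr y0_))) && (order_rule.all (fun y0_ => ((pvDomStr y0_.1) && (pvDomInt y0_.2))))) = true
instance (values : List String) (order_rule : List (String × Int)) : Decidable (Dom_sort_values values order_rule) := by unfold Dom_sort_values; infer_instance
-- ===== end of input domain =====

-- B replaces A's rank-bucket dict + sorted-keys concatenation by one stable key-sort (idiomatic).

-- ===== PORT A =====
def sort_values (values : List String) (order_rule : List (String × Int)) : List String :=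
  let d := PySem.Dict.ofList order_rule
  let buckets : PySem.Dict Int (List String) :=
    values.foldl (fun b v =>
      -- rank = int(order_rule[v]); Pre_ excludes v ∉ order_rule (KeyError), so getD's default is never used
      let rank : Int := d.getD v 0
      -- 'if rank not in buckets: buckets[rank] = []' then 'buckets[rank].append(v)' = modify rank [] (· ++ [v])
      b.modify rank [] (fun l => l ++ [v])) PySem.Dict.empty
  -- for i in sorted(buckets): result.extend(buckets[i])
  (PySem.List.sorted buckets.keys (fun i => i) false).foldl
    (fun result i => result ++ buckets.getD i []) []

-- ===== PORT B =====
def sort_values_alt (values : List String) (order_rule : List (String × Int)) : List String :=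
  -- sorted(values, key=lambda v: int(order_rule[v])); Pre_ excludes the KeyError case
  PySem.List.sorted values (fun v => (PySem.Dict.ofList order_rule).getD v 0) false

-- ===== PRECONDITION & SPEC =====
-- Pre_ excludes exactly the inputs where some value is not a key of order_rule: there A (and B) raises KeyError.
def Pre_sort_values (values : List String) (order_rule : List (String × Int)) : Prop :=
  ∀ v ∈ values, v ∈ order_rule.map Prod.fst
instance (values : List String) (order_rule : List (String × Int)) : Decidable (Pre_sort_values values order_rule) := by unfold Pre_sort_values; infer_instance
def pvWitness_sort_values : List String × (List (String × Int)) :=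
  (["b", "a", "c", "b"], [("a", 2), ("b", 1), ("c", 2)])

def Spec_sort_values (values : List String) (order_rule : List (String × Int)) (out : List String) : Prop := out = sort_values_alt values order_rule
instance (values : List String) (order_rule : List (String × Int)) (out : List String) : Decidable (Spec_sort_values values order_rule out) := by unfold Spec_sort_values; infer_instance

-- ===== CLAIM (what is proved, stated in full; the proofs are below) =====
def Claim_equal_sort_values : Prop := ∀ (values : List String) (order_rule : List (String × Int)), Dom_sort_values values order_rule → Pre_sort_values values order_rule → Spec_sort_values values order_rule (sort_values values order_rule)

-- ===== LEMMAS AND PROOFS =====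

theorem insertBy_prefix_skip (p : String → String → Bool) (x : String) (l r : List String)
    (h : ∀ w ∈ l, p x w = false) :
    PySem.List.insertBy p x (l ++ r) = l ++ PySem.List.insertBy p x r := by
  induction l with
  | nil => simp
  | cons w l ih =>
    simp only [List.cons_append, PySem.List.insertBy, h w (by simp)]
    exact congrArg (w :: ·) (ih (fun u hu => h u (by simp [hu])))

theorem insertBy_all_before (p : String → String → Bool) (x : String) (l : List String)
    (h : ∀ w ∈ l, p x w = true) :
    PySem.List.insertBy p x l = x :: l := by
  cases l with
  | nil => rfl
  | cons w l => simp [PySem.List.insertBy, h w (by simp)]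

theorem ins_mem (kf : String → Int) (v : String) (g : Int → List String) :
    ∀ ks : List Int, ks.Pairwise (· < ·) → (∀ k ∈ ks, ∀ w ∈ g k, kf w = k) → kf v ∈ ks →
    PySem.List.insertBy (fun a b => decide (kf a < kf b)) v (ks.flatMap g)
      = ks.flatMap (fun k => g k ++ if kf v == k then [v] else []) := by
  intro ks
  induction ks with
  | nil => intro _ _ h; simp at h
  | cons k t ih =>
    intro hpw hg hmem
    rcases List.pairwise_cons.mp hpw with ⟨hkt, hpt⟩
    by_cases hk : kf v = k
    · -- this bucket: skip g k, then v goes in front of everything after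
      have hskip : ∀ w ∈ g k, (fun a b => decide (kf a < kf b)) v w = false := by
        intro w hw
        have := hg k (by simp) w hw
        simp [this, hk]
      have hfront : ∀ w ∈ t.flatMap g, (fun a b => decide (kf a < kf b)) v w = true := by
        intro w hw
        rcases List.mem_flatMap.mp hw with ⟨k', hk', hw'⟩
        have := hg k' (by simp [hk']) w hw'
        simp [this, hk]
        exact hkt k' hk'
      have hknotmem : kf v ∉ t := fun hin => lt_irrefl k (hk ▸ hkt _ hin)
      rw [List.flatMap_cons, insertBy_prefix_skip _ _ _ _ hskip,
        insertBy_all_before _ _ _ hfront, List.flatMap_cons]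
      have htail : t.flatMap (fun k' => g k' ++ if kf v == k' then [v] else []) = t.flatMap g := by
        apply List.flatMap_congr
        intro k' hk'
        have : ¬ (kf v == k') = true := by
          simp only [beq_iff_eq]
          exact fun h => hknotmem (h ▸ hk')
        simp [this]
      rw [htail]
      have hbeq : (kf v == k) = true := by simp [hk]
      simp [hbeq]
    · -- earlier bucket: k < kf v, skip g k and recurse
      have hmem' : kf v ∈ t := by
        rcases List.mem_cons.mp hmem with h | h
        · exact absurd h hk
        · exact h
      have hklt : k < kf v := hkt _ hmem'
      have hskip : ∀ w ∈ g k, (fun a b => decide (kf a < kf b)) v w = false := by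
        intro w hw
        have := hg k (by simp) w hw
        simp [this]
        omega
      rw [List.flatMap_cons, insertBy_prefix_skip _ _ _ _ hskip,
        ih hpt (fun k' hk' => hg k' (by simp [hk'])) hmem', List.flatMap_cons]
      have : ¬ (kf v == k) = true := by simp only [beq_iff_eq]; omega
      simp [this]

theorem dropWhile_ge (c : Int) :
    ∀ ks : List Int, ks.Pairwise (· < ·) →
    ∀ x ∈ ks.dropWhile (fun k => decide (k < c)), c ≤ x := by
  intro ks
  induction ks with
  | nil => intro _ x hx; simp at hx
  | cons k t ih =>
    intro hpw x hx
    rcases List.pairwise_cons.mp hpw with ⟨hkt, hpt⟩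
    by_cases hk : k < c
    · rw [List.dropWhile_cons_of_pos (by simpa using hk)] at hx
      exact ih hpt x hx
    · rw [List.dropWhile_cons_of_neg (by simpa using hk)] at hx
      rcases List.mem_cons.mp hx with h | h
      · omega
      · have := hkt x h; omega

theorem ins_not_mem (kf : String → Int) (v : String) (g : Int → List String) :
    ∀ ks : List Int, ks.Pairwise (· < ·) → (∀ k ∈ ks, ∀ w ∈ g k, kf w = k) → kf v ∉ ks →
    PySem.List.insertBy (fun a b => decide (kf a < kf b)) v (ks.flatMap g)
      = (ks.takeWhile (fun k => decide (k < kf v))).flatMap g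
        ++ v :: (ks.dropWhile (fun k => decide (k < kf v))).flatMap g := by
  intro ks
  induction ks with
  | nil => simp [PySem.List.insertBy]
  | cons k t ih =>
    intro hpw hg hmem
    rcases List.pairwise_cons.mp hpw with ⟨hkt, hpt⟩
    by_cases hk : k < kf v
    · have hskip : ∀ w ∈ g k, (fun a b => decide (kf a < kf b)) v w = false := by
        intro w hw
        have := hg k (by simp) w hw
        simp [this]
        omega
      rw [List.flatMap_cons, insertBy_prefix_skip _ _ _ _ hskip,
        ih hpt (fun k' hk' => hg k' (by simp [hk'])) (fun h => hmem (by simp [h])),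
        List.takeWhile_cons_of_pos (by simpa using hk),
        List.dropWhile_cons_of_pos (by simpa using hk), List.flatMap_cons, List.append_assoc]
    · have hkne : kf v ≠ k := fun h => hmem (by simp [h])
      have hfront : ∀ w ∈ (k :: t).flatMap g, (fun a b => decide (kf a < kf b)) v w = true := by
        intro w hw
        rcases List.mem_flatMap.mp hw with ⟨k', hk', hw'⟩
        have hkey := hg k' hk' w hw'
        have : kf v < k' := by
          rcases List.mem_cons.mp hk' with h | h
          · subst h; omega
          · have := hkt k' h; omega
        simp [hkey, this]
      rw [insertBy_all_before _ _ _ hfront,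
        List.takeWhile_cons_of_neg (by simpa using hk),
        List.dropWhile_cons_of_neg (by simpa using hk)]
      simp

-- the heart of the proof: concatenating the per-rank filters over the sorted distinct
-- ranks IS the stable sort by rank
theorem master (kf : String → Int) (vs : List String) :
    (PySem.List.sorted (PySem.Set.ofList (vs.map kf)) (fun i => i) false).flatMap
      (fun k => vs.filter (fun v => kf v == k))
    = PySem.List.sorted vs kf false := by
  induction vs using List.reverseRecOn with
  | nil => simp [PySem.List.sorted]
  | append_singleton vs v ih =>
    have hS : PySem.Set.ofList ((vs ++ [v]).map kf)
        = PySem.Set.add (PySem.Set.ofList (vs.map kf)) (kf v) := by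
      rw [List.map_append, List.map_singleton, PySem.Set.ofList_append_singleton]
    set S := PySem.Set.ofList (vs.map kf) with hSdef
    have hSnd : S.Nodup := PySem.Set.nodup_ofList _
    set ks := PySem.List.sorted S (fun i => i) false with hksdef
    have hperm : ks.Perm S := PySem.List.sorted_perm _ _ _
    have hksnd : ks.Nodup := hperm.symm.nodup hSnd
    have hkmem : ∀ k : Int, k ∈ ks ↔ k ∈ S := fun k => hperm.mem_iff
    have hpw : ks.Pairwise (· < ·) := by
      have hle : ks.Pairwise (fun a b : Int => a ≤ b) := PySem.List.sorted_pairwise _ _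
      exact (hle.and hksnd).imp (fun h => lt_of_le_of_ne h.1 h.2)
    have hg : ∀ k ∈ ks, ∀ w ∈ vs.filter (fun u => kf u == k), kf w = k := by
      intro k _ w hw
      simpa using (List.of_mem_filter hw)
    have hfilt : ∀ k : Int, (vs ++ [v]).filter (fun u => kf u == k)
        = vs.filter (fun u => kf u == k) ++ if kf v == k then [v] else [] := by
      intro k; rw [List.filter_append, List.filter_singleton]
      cases kf v == k <;> rfl
    have hsortstep : PySem.List.sorted (vs ++ [v]) kf false
        = PySem.List.insertBy (fun a b => decide (kf a < kf b)) v (PySem.List.sorted vs kf false) := by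
      rw [PySem.List.sorted_eq_foldl_insertBy, PySem.List.sorted_eq_foldl_insertBy, List.foldl_append]
      simp
    by_cases hmem : kf v ∈ S
    · -- an existing bucket: the key set and its sorted order are unchanged
      have hS' : PySem.Set.ofList ((vs ++ [v]).map kf) = S := by
        rw [hS, PySem.Set.add_of_mem hmem]
      rw [hS', ← hksdef, hsortstep, ← ih,
        ins_mem kf v _ ks hpw hg ((hkmem _).mpr hmem)]
      apply List.flatMap_congr
      intro k _
      rw [hfilt k]
    · -- a fresh rank: it is spliced into its ordered position, with [v] as its whole bucket
      have hS' : PySem.Set.ofList ((vs ++ [v]).map kf) = S ++ [kf v] := by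
        rw [hS, PySem.Set.add_of_not_mem hmem]
      set A := ks.takeWhile (fun k => decide (k < kf v)) with hA
      set B := ks.dropWhile (fun k => decide (k < kf v)) with hB
      have hAB : A ++ B = ks := List.takeWhile_append_dropWhile
      have hAlt : ∀ a ∈ A, a < kf v := by
        intro a ha; simpa using List.mem_takeWhile_imp ha
      have hksmem : kf v ∉ ks := fun h => hmem ((hkmem _).mp h)
      have hBgt : ∀ b ∈ B, kf v < b := by
        intro b hb
        have h1 := dropWhile_ge (kf v) ks hpw b hb
        have hb' : b ∈ ks := by rw [← hAB]; exact List.mem_append_right A hb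
        have h2 : b ≠ kf v := fun h => hksmem (h ▸ hb')
        omega
      have hABS : (A ++ B).Perm S := by rw [hAB]; exact hperm
      have hpairsAB : List.Pairwise (· < ·) (A ++ B) := by rw [hAB]; exact hpw
      rcases List.pairwise_append.mp hpairsAB with ⟨hApw, hBpw, hcross⟩
      have hys : PySem.List.sorted (S ++ [kf v]) (fun i => i) false = A ++ kf v :: B := by
        apply PySem.List.sorted_eq_of_perm_of_pairwise_lt
        · exact (List.perm_middle).trans ((hABS.cons _).trans (List.perm_append_singleton _ _).symm)
        · rw [List.pairwise_append]
          refine ⟨hApw, ?_, ?_⟩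
          · rw [List.pairwise_cons]
            exact ⟨hBgt, hBpw⟩
          · intro a ha b hb
            rcases List.mem_cons.mp hb with h | h
            · exact h ▸ hAlt a ha
            · exact hcross a ha b h
      have hgv : vs.filter (fun u => kf u == kf v) = [] := by
        rw [List.filter_eq_nil_iff]
        intro u hu h
        exact hmem (by
          rw [hSdef, PySem.Set.mem_ofList]
          exact List.mem_map.mpr ⟨u, hu, (beq_iff_eq.mp h)⟩)
      rw [hS', hys, hsortstep, ← ih,
        ins_not_mem kf v _ ks hpw hg hksmem, ← hA, ← hB]
      rw [List.flatMap_append, List.flatMap_cons]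
      have hgA : A.flatMap (fun k => (vs ++ [v]).filter (fun u => kf u == k))
          = A.flatMap (fun k => vs.filter (fun u => kf u == k)) := by
        apply List.flatMap_congr
        intro k hk
        rw [hfilt k]
        have : ¬ (kf v == k) = true := by
          simp only [beq_iff_eq]; have := hAlt k hk; omega
        simp [this]
      have hgB : B.flatMap (fun k => (vs ++ [v]).filter (fun u => kf u == k))
          = B.flatMap (fun k => vs.filter (fun u => kf u == k)) := by
        apply List.flatMap_congr
        intro k hk
        rw [hfilt k]
        have : ¬ (kf v == k) = true := by
          simp only [beq_iff_eq]; have := hBgt k hk; omega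
        simp [this]
      rw [hgA, hgB, hfilt, hgv]
      simp

-- ===== VERDICT (by name: the statement is the Claim_ definition above) =====
theorem sort_values_spec : Claim_equal_sort_values := by
  intro values order_rule _ _
  unfold Spec_sort_values sort_values sort_values_alt
  set kf : String → Int := fun v => (PySem.Dict.ofList order_rule).getD v 0 with hkf
  set buckets : PySem.Dict Int (List String) :=
    values.foldl (fun b v => b.modify (kf v) [] (fun l => l ++ [v])) PySem.Dict.empty with hbdef
  have hkeys : buckets.keys = PySem.Set.ofList (values.map kf) := by
    rw [hbdef, PySem.Dict.keys_foldl_modify_key values kf [] (fun _ v l => l ++ [v])]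
    simp [PySem.Set.update_nil_left]
  have hgetD : ∀ c : Int, buckets.getD c [] = values.filter (fun v => kf v == c) := by
    intro c
    have h := PySem.Dict.getD_foldl_modify_append
      (l := values.map (fun v => (kf v, v))) (d := (PySem.Dict.empty : PySem.Dict Int (List String))) (c := c)
    rw [List.foldl_map] at h
    simpa [List.filter_map, Function.comp_def] using h
  rw [PySem.List.foldl_append_eq_flatMap, List.nil_append, hkeys]
  calc (PySem.List.sorted (PySem.Set.ofList (values.map kf)) (fun i => i) false).flatMap
        (fun i => buckets.getD i [])
      = (PySem.List.sorted (PySem.Set.ofList (values.map kf)) (fun i => i) false).flatMap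
        (fun k => values.filter (fun v => kf v == k)) := by
        apply List.flatMap_congr; intro k _; exact hgetD k
    _ = PySem.List.sorted values kf false := master kf values
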